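-- pv_equiv track=rewrite | github.com/I-2n-A/I-2n-A | lab2/dop1.py | Check
-- ===== SOURCE A (Python) =====
-- def Check(x):
--     a = x
--     s = 0
--     p = 1
--     while a > 0:
--         s += a % 10
--         a //= 10
--     if s != 1:
--         while p < x:
--             p *= s
--     return p == x
-- ===== SOURCE B (Python) =====
-- def Check(x):
--     s = 0
--     a = x
--     while a > 0:
--         s += a % 10
--         a //= 10
--     if s <= 1:
--         return x == 1
--     t = x
--     while t % s == 0:
--         t //= s
--     return t == 1
-- ===== Notes on version B (the rewrite author's own statement) =====
-- stated objective: alternative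
-- what changed: B keeps the digit-sum loop but tests 'x is a power of the digit sum s' by repeatedly dividing x by s until it is no longer divisible and checking that the quotient reached unity, instead of A's upward multiplication of p past x; the degenerate digit sums collapse to a direct equality test of x against unity.
import Mathlib
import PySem

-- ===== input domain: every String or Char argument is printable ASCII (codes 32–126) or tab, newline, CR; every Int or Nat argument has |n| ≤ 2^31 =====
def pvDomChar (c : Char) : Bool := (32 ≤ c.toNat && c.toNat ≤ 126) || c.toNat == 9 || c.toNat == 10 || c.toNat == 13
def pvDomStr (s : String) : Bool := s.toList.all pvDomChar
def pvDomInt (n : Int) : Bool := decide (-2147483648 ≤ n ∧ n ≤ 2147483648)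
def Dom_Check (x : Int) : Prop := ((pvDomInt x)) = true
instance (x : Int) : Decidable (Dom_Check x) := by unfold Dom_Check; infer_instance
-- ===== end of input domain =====

-- B replaces A's upward power-building loop (p *= s until p ≥ x) by downward division
-- (t //= s while divisible), with the s ≤ 1 cases collapsing to 'x == 1'; same return value.

-- ===== PORT A =====
-- the 'while a > 0: s += a % 10; a //= 10' digit-sum loop (identical in both Pythons)
def digitLoop (a s : Int) : Int :=
  if 0 < a then digitLoop (PySem.Int.floordiv a 10) (s + PySem.Int.mod a 10) else s
termination_by a.toNat
decreasing_by
  rename_i h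
  rw [PySem.Int.floordiv_eq_ediv_of_pos (by omega : (0:Int) < 10)]
  omega

-- 'while p < x: p *= s'; the extra '2 ≤ s ∧ 1 ≤ p' guard only makes the recursion total:
-- it holds whenever the Python loop body runs (the loop is reached only with s ≠ 1, and
-- for p < x with x > 0 the digit sum s is ≥ 1; p stays ≥ 1)
def powLoop (s x p : Int) : Int :=
  if _h : p < x ∧ 2 ≤ s ∧ 1 ≤ p then powLoop s x (p * s) else p
termination_by (x - p).toNat
decreasing_by
  obtain ⟨_h1, h2, h3⟩ := _h
  have : p * 2 ≤ p * s := by nlinarith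
  omega

def Check (x : Int) : Bool :=
  let s := digitLoop x 0
  let p : Int := 1
  let p := if s ≠ 1 then powLoop s x p else p
  p == x

-- ===== PORT B =====
-- 'while t % s == 0: t //= s'; the extra '2 ≤ s ∧ 1 ≤ t' guard only makes the recursion
-- total: it holds whenever B's Python loop body runs (the loop is reached only with s ≥ 2,
-- hence x ≥ 1, and t stays ≥ 1 while divisible)
def divLoop (s t : Int) : Int :=
  if _h : PySem.Int.mod t s = 0 ∧ 2 ≤ s ∧ 1 ≤ t then divLoop s (PySem.Int.floordiv t s) else t
termination_by t.toNat
decreasing_by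
  obtain ⟨_h1, h2, h3⟩ := _h
  rw [PySem.Int.floordiv_eq_ediv_of_pos (by omega : (0:Int) < s)]
  have hq0 : 0 ≤ t / s := Int.ediv_nonneg (by omega) (by omega)
  have hdm : s * (t / s) + t % s = t := Int.mul_ediv_add_emod t s
  have hr : 0 ≤ t % s := Int.emod_nonneg t (by omega)
  have : 2 * (t / s) ≤ s * (t / s) := by nlinarith
  omega

def Check_alt (x : Int) : Bool :=
  let s := digitLoop x 0
  if s ≤ 1 then x == 1
  else divLoop s x == 1

-- ===== PRECONDITION & SPEC =====
def Spec_Check (x : Int) (out : Bool) : Prop := out = Check_alt x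
instance (x : Int) (out : Bool) : Decidable (Spec_Check x out) := by unfold Spec_Check; infer_instance

-- ===== CLAIM (what is proved, stated in full; the proofs are below) =====
def Claim_equal_Check : Prop := ∀ (x : Int), Dom_Check x → Spec_Check x (Check x)

-- ===== LEMMAS AND PROOFS =====

lemma digitLoop_nonpos (a s : Int) (h : a ≤ 0) : digitLoop a s = s := by
  rw [digitLoop, if_neg (by omega : ¬ 0 < a)]

-- the digit sum of a positive number is positive
lemma digitLoop_gt : ∀ (n : Nat) (a s : Int), a.toNat ≤ n → 1 ≤ a → s < digitLoop a s := by
  intro n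
  induction n with
  | zero => intro a s h1 h2; omega
  | succ n ih =>
    intro a s h1 h2
    rw [digitLoop, if_pos (by omega : 0 < a)]
    rw [PySem.Int.floordiv_eq_ediv_of_pos (by omega : (0:Int) < 10),
        PySem.Int.mod_eq_emod_of_pos (by omega : (0:Int) < 10)]
    by_cases hq : 1 ≤ a / 10
    · have := ih (a / 10) (s + a % 10) (by omega) hq
      omega
    · rw [digitLoop_nonpos _ _ (by omega)]
      omega

-- A's loop reaches x exactly when x is p times a power of s
lemma powLoop_eq_iff : ∀ (n : Nat) (s x p : Int), (x - p).toNat ≤ n → 2 ≤ s → 1 ≤ p →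
    (powLoop s x p = x ↔ ∃ k : Nat, x = p * s ^ k) := by
  intro n
  induction n with
  | zero =>
    intro s x p hn hs hp
    rw [powLoop, dif_neg (by omega : ¬ (p < x ∧ 2 ≤ s ∧ 1 ≤ p))]
    constructor
    · rintro rfl; exact ⟨0, by ring⟩
    · rintro ⟨k, rfl⟩
      have h1 : (1:Int) ≤ s ^ k := one_le_pow₀ (by omega)
      have h2 : p * 1 ≤ p * s ^ k := by nlinarith
      omega
  | succ n ih =>
    intro s x p hn hs hp
    by_cases hlt : p < x
    · rw [powLoop, dif_pos (⟨hlt, hs, hp⟩ : p < x ∧ 2 ≤ s ∧ 1 ≤ p)]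
      have hps : p * 2 ≤ p * s := by nlinarith
      rw [ih s x (p * s) (by omega) hs (by omega)]
      constructor
      · rintro ⟨k, rfl⟩; exact ⟨k + 1, by ring⟩
      · rintro ⟨k, hk⟩
        cases k with
        | zero => simp at hk; omega
        | succ k => exact ⟨k, by rw [hk]; ring⟩
    · rw [powLoop, dif_neg (by omega : ¬ (p < x ∧ 2 ≤ s ∧ 1 ≤ p))]
      constructor
      · rintro rfl; exact ⟨0, by ring⟩
      · rintro ⟨k, rfl⟩
        have h1 : (1:Int) ≤ s ^ k := one_le_pow₀ (by omega)
        have h2 : p * 1 ≤ p * s ^ k := by nlinarith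
        omega

-- B's loop ends at 1 exactly when t is a power of s
lemma divLoop_eq_one_iff : ∀ (n : Nat) (s t : Int), t.toNat ≤ n → 2 ≤ s → 1 ≤ t →
    (divLoop s t = 1 ↔ ∃ k : Nat, t = s ^ k) := by
  intro n
  induction n with
  | zero => intro s t hn hs ht; omega
  | succ n ih =>
    intro s t hn hs ht
    by_cases hd : PySem.Int.mod t s = 0
    · have hdvd : s ∣ t := (PySem.Int.mod_eq_zero_iff_dvd t s).mp hd
      obtain ⟨c, rfl⟩ := hdvd
      have hc : 1 ≤ c := by nlinarith
      rw [divLoop, dif_pos (⟨hd, hs, ht⟩ : PySem.Int.mod (s * c) s = 0 ∧ 2 ≤ s ∧ 1 ≤ s * c)]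
      rw [PySem.Int.floordiv_eq_ediv_of_pos (by omega : (0:Int) < s),
          Int.mul_ediv_cancel_left c (by omega : s ≠ 0)]
      have hclt : c < s * c := by nlinarith
      rw [ih s c (by omega) hs hc]
      constructor
      · rintro ⟨k, rfl⟩; exact ⟨k + 1, by ring⟩
      · rintro ⟨k, hk⟩
        cases k with
        | zero => simp at hk; exfalso; nlinarith
        | succ k =>
          refine ⟨k, mul_left_cancel₀ (by omega : s ≠ 0) ?_⟩
          rw [hk]; ring
    · rw [divLoop, dif_neg (by tauto : ¬ (PySem.Int.mod t s = 0 ∧ 2 ≤ s ∧ 1 ≤ t))]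
      constructor
      · rintro rfl; exact ⟨0, by simp⟩
      · rintro ⟨k, rfl⟩
        cases k with
        | zero => simp
        | succ k =>
          exfalso; apply hd
          rw [PySem.Int.mod_eq_zero_iff_dvd]
          exact ⟨s ^ k, by ring⟩

lemma beq_one_comm (x : Int) : ((1 : Int) == x) = (x == 1) := by
  rw [Bool.eq_iff_iff]; simp only [beq_iff_eq]; omega

-- ===== VERDICT (by name: the statement is the Claim_ definition above) =====
theorem Check_spec : Claim_equal_Check := by
  intro x _
  unfold Spec_Check Check Check_alt
  set s := digitLoop x 0 with hs
  by_cases hx : x ≤ 0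
  · have hs0 : s = 0 := by rw [hs]; exact digitLoop_nonpos x 0 hx
    rw [hs0]
    show ((if (0:Int) ≠ 1 then powLoop 0 x 1 else 1) == x) =
      (if (0:Int) ≤ 1 then x == 1 else divLoop 0 x == 1)
    rw [if_pos (by omega : ((0:Int) ≠ 1)), if_pos (by omega : ((0:Int) ≤ 1)),
        powLoop, dif_neg (by omega : ¬ ((1:Int) < x ∧ 2 ≤ (0:Int) ∧ 1 ≤ (1:Int)))]
    exact beq_one_comm x
  · have hx1 : 1 ≤ x := by omega
    have hs1 : 1 ≤ s := by
      have := digitLoop_gt x.toNat x 0 (by omega) hx1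
      omega
    by_cases hse : s = 1
    · rw [hse]
      show ((if (1:Int) ≠ 1 then powLoop 1 x 1 else 1) == x) =
        (if (1:Int) ≤ 1 then x == 1 else divLoop 1 x == 1)
      rw [if_neg (by omega : ¬ ((1:Int) ≠ 1)), if_pos (le_refl (1:Int))]
      exact beq_one_comm x
    · have hs2 : 2 ≤ s := by omega
      show ((if s ≠ 1 then powLoop s x 1 else 1) == x) =
        (if s ≤ 1 then x == 1 else divLoop s x == 1)
      rw [if_pos hse, if_neg (by omega : ¬ s ≤ 1), Bool.eq_iff_iff]
      simp only [beq_iff_eq]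
      rw [powLoop_eq_iff (x - 1).toNat s x 1 (by omega) hs2 (le_refl 1),
          divLoop_eq_one_iff x.toNat s x (by omega) hs2 hx1]
      simp
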